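-- pv_equiv track=rewrite | github.com/DragosStoican/Contests | Kick Start/Round 2/rover2.py | parantheses
-- ===== SOURCE A (Python) =====
-- def parantheses(program):
--     translate = ""
--     while (program != ""):
--         step = program[0]
--         if (step == "S"):
--             translate += step
--         elif (step == "N"):
--             translate += step
--         elif (step == "E"):
--             translate += step
--         elif (step == "W"):
--             translate += step
--         elif(step.isdecimal()):
--             temp = parantheses(program[2 :])
--             translate += temp * int(step)
--             program = program[len(temp) + 2 :]
--         elif (step == ")"):
--             return translate
--         program = program[1:]
--     return translate
-- ===== SOURCE B (Python) =====
-- def parantheses(program):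
--     s = program
--     n = len(s)
--
--     def go(i):
--         parts = []
--         while i < n:
--             c = s[i]
--             if c in "SNEW":
--                 parts.append(c)
--                 i += 1
--             elif c.isdecimal():
--                 temp = go(i + 2)
--                 parts.append(temp * int(c))
--                 i += len(temp) + 3
--             elif c == ")":
--                 break
--             else:
--                 i += 1
--         return "".join(parts)
--
--     return go(0)
-- ===== Notes on version B (the rewrite author's own statement) =====
-- stated objective: faster
-- what changed: Replaces A's repeated string slicing (program[1:], program[2:], program[k:] each copy the remaining string) with an index-based recursive descent over the fixed input, collecting pieces in a list joined once at the end; nested groups are parsed by a recursive call at i+2 and the index advances by len(temp)+3 exactly as A's slicing does.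
import Mathlib
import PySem

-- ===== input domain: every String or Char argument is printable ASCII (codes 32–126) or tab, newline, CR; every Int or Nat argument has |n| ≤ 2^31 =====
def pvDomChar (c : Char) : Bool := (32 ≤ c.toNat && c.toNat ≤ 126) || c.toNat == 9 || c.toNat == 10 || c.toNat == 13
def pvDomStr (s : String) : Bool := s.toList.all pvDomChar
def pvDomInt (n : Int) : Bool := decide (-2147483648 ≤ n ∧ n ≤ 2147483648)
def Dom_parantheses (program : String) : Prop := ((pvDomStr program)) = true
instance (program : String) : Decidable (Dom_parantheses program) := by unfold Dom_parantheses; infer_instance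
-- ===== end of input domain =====

-- B replaces A's O(n^2) repeated string slicing with an index-based recursive descent over the
-- fixed input string (objective: faster, asymptotic; A = B exactly, total).

-- termination lemmas cited by name from the ports' decreasing_by (kept above the ports for that reason)
theorem pvDecA₀ (a : Char) (l : List Char) : l.length < (a :: l).length := by simp
theorem pvDecA₁ (a : Char) (l : List Char) : (List.drop 2 (a :: l)).length < (a :: l).length := by
  simp only [List.length_drop, List.length_cons]; omega
theorem pvDecA₂ (a : Char) (l : List Char) (t : Nat) :
    (List.drop 1 (List.drop (t + 2) (a :: l))).length < (a :: l).length := by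
  simp only [List.length_drop, List.length_cons]; omega
theorem pvDecB₁ {n i : Nat} (h : i < n) : n - (i + 1) < n - i := by omega
theorem pvDecB₂ {n i : Nat} (h : i < n) : n - (i + 2) < n - i := by omega
theorem pvDecB₃ {n i : Nat} (h : i < n) (t : Nat) : n - (i + t + 3) < n - i := by omega

-- ===== PORT A =====
-- A's while loop over (program, translate); each slice program[k:] is List.drop on the same list.
-- step.isdecimal() → PySem.Chars.isdigit (exact on the printable-ASCII domain);
-- int(step) for a digit char → (step.toNat : Int) - 48; temp * int(step) → PySem.List.pyRepeat.
def paranALoop (program translate : List Char) : List Char :=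
  match program with
  | [] => translate
  | step :: rest =>
    if step = 'S' then paranALoop rest (translate ++ [step])
    else if step = 'N' then paranALoop rest (translate ++ [step])
    else if step = 'E' then paranALoop rest (translate ++ [step])
    else if step = 'W' then paranALoop rest (translate ++ [step])
    else if PySem.Chars.isdigit step then
      let temp := paranALoop ((step :: rest).drop 2) []
      let program' := (step :: rest).drop (temp.length + 2)
      paranALoop (program'.drop 1) (translate ++ PySem.List.pyRepeat temp ((step.toNat : Int) - 48))
    else if step = ')' then translate
    else paranALoop rest translate
termination_by program.length
decreasing_by
  all_goals first
    | exact pvDecA₀ step rest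
    | exact pvDecA₁ step rest
    | exact pvDecA₂ step rest _

def parantheses (program : String) : String := String.ofList (paranALoop program.toList [])

-- ===== PORT B =====
-- Source B's go(i): while loop collecting parts, joined at the end; nested group parsed by a
-- recursive call at index i+2, then the index advances by len(temp)+3 (no slicing).
def paranGo (s : List Char) (i : Nat) (parts : List (List Char)) : List Char :=
  if h : i < s.length then
    let c := s[i]
    if c = 'S' ∨ c = 'N' ∨ c = 'E' ∨ c = 'W' then paranGo s (i+1) (parts ++ [[c]])
    else if PySem.Chars.isdigit c then
      let temp := paranGo s (i+2) []
      paranGo s (i + temp.length + 3) (parts ++ [PySem.List.pyRepeat temp ((c.toNat : Int) - 48)])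
    else if c = ')' then parts.flatten
    else paranGo s (i+1) parts
  else parts.flatten
termination_by s.length - i
decreasing_by
  all_goals first
    | exact pvDecB₁ h
    | exact pvDecB₂ h
    | exact pvDecB₃ h _

def parantheses_alt (program : String) : String := String.ofList (paranGo program.toList 0 [])

-- ===== PRECONDITION & SPEC =====
def Spec_parantheses (program : String) (out : String) : Prop := out = parantheses_alt program
instance (program : String) (out : String) : Decidable (Spec_parantheses program out) := by unfold Spec_parantheses; infer_instance

-- ===== CLAIM (what is proved, stated in full; the proofs are below) =====
def Claim_equal_parantheses : Prop := ∀ (program : String), Dom_parantheses program → Spec_parantheses program (parantheses program)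

-- ===== LEMMAS AND PROOFS =====

theorem paran_main (s : List Char) (n : Nat) :
    ∀ (i : Nat) (translate : List Char) (parts : List (List Char)),
      s.length - i ≤ n → translate = parts.flatten →
      paranALoop (s.drop i) translate = paranGo s i parts := by
  induction n with
  | zero =>
    intro i translate parts hle ht
    have hge : s.length ≤ i := by omega
    rw [List.drop_eq_nil_of_le hge, paranALoop, paranGo]
    simp [Nat.not_lt.mpr hge, ht]
  | succ n ih =>
    intro i translate parts hle ht
    by_cases h : i < s.length
    · have hdrop : s.drop i = s[i] :: s.drop (i + 1) := List.drop_eq_getElem_cons h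
      rw [hdrop, paranALoop, paranGo, dif_pos h]
      set c := s[i] with hc
      by_cases hS : c = 'S'
      · simp only [hS, if_pos, Or.inl, reduceIte]
        exact ih (i+1) _ _ (by omega) (by simp [ht])
      · by_cases hN : c = 'N'
        · simp only [hN, hS, if_neg, if_pos rfl, reduceCtorEq, Char.reduceEq,
            if_pos (Or.inr (Or.inl rfl))]
          exact ih (i+1) _ _ (by omega) (by simp [ht])
        · by_cases hE : c = 'E'
          · simp only [hE, hS, hN, if_neg, if_pos rfl, reduceCtorEq, Char.reduceEq,
              if_pos (Or.inr (Or.inr (Or.inl rfl)))]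
            exact ih (i+1) _ _ (by omega) (by simp [ht])
          · by_cases hW : c = 'W'
            · simp only [hW, hS, hN, hE, if_neg, if_pos rfl, reduceCtorEq, Char.reduceEq,
                if_pos (Or.inr (Or.inr (Or.inr rfl)))]
              exact ih (i+1) _ _ (by omega) (by simp [ht])
            · have hno : ¬ (c = 'S' ∨ c = 'N' ∨ c = 'E' ∨ c = 'W') := by tauto
              simp only [if_neg hS, if_neg hN, if_neg hE, if_neg hW, if_neg hno]
              by_cases hd : PySem.Chars.isdigit c = true
              · simp only [if_pos hd]
                have hdrop2 : (c :: s.drop (i + 1)).drop 2 = s.drop (i + 2) := by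
                  simp [List.drop_drop]
                have htemp : paranALoop ((c :: s.drop (i + 1)).drop 2) [] = paranGo s (i + 2) [] := by
                  rw [hdrop2]
                  exact ih (i+2) _ _ (by omega) (by simp)
                rw [htemp]
                set temp := paranGo s (i + 2) [] with htempdef
                have hdropk : ((c :: s.drop (i + 1)).drop (temp.length + 2)).drop 1
                    = s.drop (i + temp.length + 3) := by
                  simp [List.drop_drop]
                  congr 1
                  omega
                rw [hdropk]
                exact ih (i + temp.length + 3) _ _ (by omega) (by simp [ht])
              · simp only [if_neg hd]
                by_cases hp : c = ')'
                · simp [hp, ht]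
                · simp only [if_neg hp]
                  exact ih (i+1) _ _ (by omega) ht
    · have hge : s.length ≤ i := by omega
      rw [List.drop_eq_nil_of_le hge, paranALoop, paranGo]
      simp [Nat.not_lt.mpr hge, ht]

-- ===== VERDICT (by name: the statement is the Claim_ definition above) =====
theorem parantheses_spec : Claim_equal_parantheses := by
  intro program _
  unfold Spec_parantheses parantheses parantheses_alt
  have h := paran_main program.toList program.toList.length 0 [] [] (by omega) (by simp)
  rw [List.drop_zero] at h
  exact congrArg String.ofList h
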